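-- pv_equiv track=rewrite | github.com/Jh123x/AdventOfCode | 2024/day1/test.py | part2
-- ===== SOURCE A (Python) =====
-- from typing import List
-- from collections import defaultdict
--
-- def part2(a1: List[int], a2: List[int]) -> int:
--     score = 0
--     freq_list_1 = defaultdict(int)
--     freq_list_2 = defaultdict(int)
--     for no in a1:
--         freq_list_1[no] += 1
--
--     for no in a2:
--         freq_list_2[no] += 1
--
--     for k, v in freq_list_1.items():
--         score += v * (k * freq_list_2[k])
--
--     return score
-- ===== SOURCE B (Python) =====
-- from typing import List
--
-- def part2(a1: List[int], a2: List[int]) -> int: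
--     # Sort both lists and do a merge-style scan with an index into sorted(a2):
--     # for each value of sorted(a1), skip the smaller elements of sorted(a2),
--     # then measure the run of equal elements. No hash tables at all.
--     score = 0
--     s2 = sorted(a2)
--     m = len(s2)
--     j = 0
--     for v in sorted(a1):
--         while j < m and s2[j] < v:
--             j += 1
--         k = j
--         while k < m and s2[k] == v:
--             k += 1
--         score += v * (k - j)
--     return score
-- ===== Notes on version B (the rewrite author's own statement) =====
-- stated objective: alternative
-- what changed: B uses no hash tables: it sorts both lists and computes the score with a merge-style index scan over sorted(a2), skipping smaller elements and measuring the run equal to each element of sorted(a1).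
import Mathlib
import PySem

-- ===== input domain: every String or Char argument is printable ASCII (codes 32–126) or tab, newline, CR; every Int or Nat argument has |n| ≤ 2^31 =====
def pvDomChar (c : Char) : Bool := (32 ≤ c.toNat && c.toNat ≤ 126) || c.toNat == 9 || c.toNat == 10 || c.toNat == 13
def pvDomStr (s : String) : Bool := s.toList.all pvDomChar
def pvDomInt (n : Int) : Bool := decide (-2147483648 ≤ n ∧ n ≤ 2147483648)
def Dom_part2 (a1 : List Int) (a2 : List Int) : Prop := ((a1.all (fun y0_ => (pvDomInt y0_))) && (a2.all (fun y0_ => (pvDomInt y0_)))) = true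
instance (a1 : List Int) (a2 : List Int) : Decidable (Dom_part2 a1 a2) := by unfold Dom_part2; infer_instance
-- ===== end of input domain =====

-- B drops the hash tables entirely: it sorts both lists and computes the score by a
-- merge-style index scan (skip smaller elements of sorted a2, measure the equal run) —
-- an alternative algorithm of similar cost, not claimed faster.


-- ===== PORT A =====
-- A: build freq tables of a1 and a2, then sum v * (k * freq2[k]) over freq1's items.
-- (A's 'freq_list_2[k]' on a defaultdict inserts a 0 entry for missing k; that insertion
-- is unobservable in the return value, so it is ported as getD _ _ 0.)
def part2 (a1 : List Int) (a2 : List Int) : Int :=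
  let freq1 := a1.foldl (fun d no => d.modify no 0 (· + 1)) (PySem.Dict.empty : PySem.Dict Int Int)
  let freq2 := a2.foldl (fun d no => d.modify no 0 (· + 1)) (PySem.Dict.empty : PySem.Dict Int Int)
  freq1.items.foldl (fun score kv => score + kv.2 * (kv.1 * freq2.getD kv.1 0)) 0

-- ===== PORT B =====
-- 'while j < m and s2[j] < v: j += 1'
def advLt (s2 : List Int) (v : Int) (j : Nat) : Nat :=
  if h : j < s2.length ∧ s2.getD j 0 < v then advLt s2 v (j + 1) else j
termination_by s2.length - j
decreasing_by omega

-- 'k = j; while k < m and s2[k] == v: k += 1'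
def advEq (s2 : List Int) (v : Int) (k : Nat) : Nat :=
  if h : k < s2.length ∧ s2.getD k 0 = v then advEq s2 v (k + 1) else k
termination_by s2.length - k
decreasing_by omega

def part2_alt (a1 : List Int) (a2 : List Int) : Int :=
  let s2 := PySem.List.sorted a2 (fun x => x) false
  let st := (PySem.List.sorted a1 (fun x => x) false).foldl
    (fun st v =>
      let j := advLt s2 v st.1
      let k := advEq s2 v j
      (j, st.2 + v * ((k : Int) - (j : Int))))
    ((0 : Nat), (0 : Int))
  st.2

-- ===== PRECONDITION & SPEC =====
def Spec_part2 (a1 : List Int) (a2 : List Int) (out : Int) : Prop := out = part2_alt a1 a2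
instance (a1 : List Int) (a2 : List Int) (out : Int) : Decidable (Spec_part2 a1 a2 out) := by unfold Spec_part2; infer_instance

-- ===== CLAIM (what is proved, stated in full; the proofs are below) =====
def Claim_equal_part2 : Prop := ∀ (a1 : List Int) (a2 : List Int), Dom_part2 a1 a2 → Spec_part2 a1 a2 (part2 a1 a2)

-- ===== LEMMAS AND PROOFS =====

-- proof-only model of the scan over suffixes of s2
def dropLt (v : Int) : List Int → List Int
  | [] => []
  | x :: xs => if x < v then dropLt v xs else x :: xs

def countPrefixEq (v : Int) : List Int → Int
  | [] => 0
  | x :: xs => if x ≠ v then 0 else countPrefixEq v xs + 1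

-- ---- A-side: part2 = Σ_{no ∈ a1} no * count a2 no ----

theorem sum_ite_single (s : List Int) (x : Int) (g : Int → Int)
    (hs : s.Nodup) (hx : x ∈ s) :
    (s.map (fun k => if x = k then g k else 0)).sum = g x := by
  induction s with
  | nil => cases hx
  | cons a t ih =>
    rcases List.nodup_cons.mp hs with ⟨ha, ht⟩
    by_cases hxa : x = a
    · subst hxa
      have hz : (t.map (fun k => if x = k then g k else 0)).sum = 0 := by
        apply List.sum_eq_zero
        intro y hy
        rcases List.mem_map.mp hy with ⟨k, hk, hky⟩
        have : x ≠ k := fun h => ha (h ▸ hk)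
        simpa [this] using hky.symm
      simp [hz]
    · have hx' : x ∈ t := (List.mem_cons.mp hx).resolve_left hxa
      simp [hxa, ih ht hx']

theorem sum_count_dedup (l : List Int) (g : Int → Int) :
    ((PySem.Set.ofList l).map (fun k => (l.count k : Int) * g k)).sum = (l.map g).sum := by
  induction l using List.reverseRecOn with
  | nil => simp [PySem.Set.ofList_nil]
  | append_singleton l x ih =>
    have hcount : ∀ k : Int, ((l ++ [x]).count k : Int)
        = (l.count k : Int) + (if x = k then 1 else 0) := by
      intro k
      rw [List.count_append]
      by_cases h : x = k <;> simp [h]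
    rw [PySem.Set.ofList_append_singleton, PySem.Set.add_eq_ite]
    by_cases hx : x ∈ PySem.Set.ofList l
    · rw [if_pos hx]
      have : ((PySem.Set.ofList l).map (fun k => ((l ++ [x]).count k : Int) * g k)).sum
          = ((PySem.Set.ofList l).map (fun k => (l.count k : Int) * g k)).sum
            + ((PySem.Set.ofList l).map (fun k => if x = k then g k else 0)).sum := by
        simp only [hcount]
        rw [← List.sum_map_add]
        congr 1
        apply List.map_congr_left
        intro k _
        by_cases h : x = k <;> simp [h] <;> ring
      rw [this, ih, sum_ite_single _ _ _ (PySem.Set.nodup_ofList l) hx]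
      simp
    · rw [if_neg hx]
      have hxl : x ∉ l := fun h => hx (by simpa [PySem.Set.mem_ofList] using h)
      have hc0 : (l.count x : Int) = 0 := by simp [List.count_eq_zero_of_not_mem hxl]
      have hmap : (PySem.Set.ofList l).map (fun k => ((l ++ [x]).count k : Int) * g k)
          = (PySem.Set.ofList l).map (fun k => (l.count k : Int) * g k) := by
        apply List.map_congr_left
        intro k hk
        have hne : x ≠ k := fun h => hx (h ▸ hk)
        simp [hne]
      simp only [List.map_append, List.sum_append, hmap, ih]
      simp [hc0]

theorem part2_eq_sum (a1 a2 : List Int) :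
    part2 a1 a2 = (a1.map (fun no => no * ((a2.count no : Int)))).sum := by
  unfold part2
  rw [← PySem.Dict.counter_eq_foldl, ← PySem.Dict.counter_eq_foldl,
    PySem.List.foldl_add]
  simp only [PySem.Dict.items_counter, List.map_map, zero_add]
  have : ((PySem.Set.ofList a1).map
      ((fun kv : Int × Int => kv.2 * (kv.1 * (PySem.Dict.counter a2).getD kv.1 0)) ∘
        fun k => (k, (a1.count k : Int)))).sum
      = ((PySem.Set.ofList a1).map
        (fun k => (a1.count k : Int) * (k * (a2.count k : Int)))).sum := by
    congr 1
    apply List.map_congr_left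
    intro k _
    simp [PySem.Dict.getD_counter]
  rw [this, sum_count_dedup a1 (fun k => k * (a2.count k : Int))]

-- ---- B-side: the merge scan computes the same sum ----

theorem dropLt_sublist (v : Int) (l : List Int) : (dropLt v l).Sublist l := by
  induction l with
  | nil => simp [dropLt]
  | cons x xs ih =>
    by_cases h : x < v
    · simpa [dropLt, h] using ih.trans (List.sublist_cons_self x xs)
    · simp [dropLt, h]

theorem count_dropLt (v x : Int) (hvx : v ≤ x) (l : List Int) :
    (dropLt v l).count x = l.count x := by
  induction l with
  | nil => rfl
  | cons y ys ih =>
    by_cases h : y < v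
    · have hne : y ≠ x := by omega
      simp [dropLt, h, ih, hne]
    · simp [dropLt, h]

theorem mem_dropLt_ge (v : Int) (l : List Int) (hl : l.Pairwise (· ≤ ·)) :
    ∀ x ∈ dropLt v l, v ≤ x := by
  induction l with
  | nil => simp [dropLt]
  | cons y ys ih =>
    by_cases h : y < v
    · simpa [dropLt, h] using ih (List.Pairwise.of_cons hl)
    · intro x hx
      rcases List.mem_cons.mp (by simpa [dropLt, h] using hx) with hxy | hxs
      · omega
      · have := (List.pairwise_cons.mp hl).1 x hxs
        omega

theorem countPrefixEq_eq_count (v : Int) (l : List Int)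
    (hl : l.Pairwise (· ≤ ·)) (hge : ∀ x ∈ l, v ≤ x) :
    countPrefixEq v l = (l.count v : Int) := by
  induction l with
  | nil => rfl
  | cons x xs ih =>
    rcases List.pairwise_cons.mp hl with ⟨hx, hxs⟩
    by_cases h : x = v
    · subst h
      have : ∀ y ∈ xs, x ≤ y := hx
      simp [countPrefixEq, ih hxs this]
    · have hvx : v < x := lt_of_le_of_ne (hge x (List.mem_cons_self)) (Ne.symm h)
      have hz : xs.count v = 0 := by
        apply List.count_eq_zero_of_not_mem
        intro hv
        have := hx v hv
        omega
      simp [countPrefixEq, h, hz]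

theorem merge_scan_invariant (s1 : List Int) :
    ∀ (s2 : List Int) (acc : Int),
    s1.Pairwise (· ≤ ·) → s2.Pairwise (· ≤ ·) →
    (s1.foldl (fun st v =>
        let rest := dropLt v st.1
        (rest, st.2 + v * countPrefixEq v rest)) (s2, acc)).2
      = acc + (s1.map (fun v => v * (s2.count v : Int))).sum := by
  induction s1 with
  | nil => intro s2 acc _ _; simp
  | cons v t ih =>
    intro s2 acc h1 h2
    rcases List.pairwise_cons.mp h1 with ⟨hv, ht⟩
    have hrest_sorted : (dropLt v s2).Pairwise (· ≤ ·) :=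
      h2.sublist (dropLt_sublist v s2)
    have hge := mem_dropLt_ge v s2 h2
    have hcp : countPrefixEq v (dropLt v s2) = ((dropLt v s2).count v : Int) :=
      countPrefixEq_eq_count v _ hrest_sorted hge
    have hcv : (dropLt v s2).count v = s2.count v := count_dropLt v v le_rfl s2
    simp only [List.foldl_cons]
    rw [ih (dropLt v s2) _ ht hrest_sorted]
    have hmap : t.map (fun w => w * ((dropLt v s2).count w : Int))
        = t.map (fun w => w * (s2.count w : Int)) := by
      apply List.map_congr_left
      intro w hw
      rw [count_dropLt v w (hv w hw) s2]
    rw [hmap, hcp, hcv]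
    simp [List.map_cons, List.sum_cons]
    ring

theorem advLt_le (s2 : List Int) (v : Int) (j : Nat) (hj : j ≤ s2.length) :
    j ≤ advLt s2 v j ∧ advLt s2 v j ≤ s2.length := by
  fun_induction advLt s2 v j with
  | case1 j h ih => have := ih (by omega); omega
  | case2 j h => omega

theorem drop_advLt (s2 : List Int) (v : Int) (j : Nat) (hj : j ≤ s2.length) :
    s2.drop (advLt s2 v j) = dropLt v (s2.drop j) := by
  fun_induction advLt s2 v j with
  | case1 j h ih =>
    have hlt : j < s2.length := h.1
    have hdrop : s2.drop j = s2[j] :: s2.drop (j + 1) := List.drop_eq_getElem_cons hlt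
    have hget : s2.getD j 0 = s2[j] := List.getD_eq_getElem s2 0 hlt
    rw [ih (by omega), hdrop, dropLt]
    rw [if_pos (by rw [← hget]; exact h.2)]
  | case2 j h =>
    rcases Nat.lt_or_ge j s2.length with hlt | hge
    · have hdrop : s2.drop j = s2[j] :: s2.drop (j + 1) := List.drop_eq_getElem_cons hlt
      have hget : s2.getD j 0 = s2[j] := List.getD_eq_getElem s2 0 hlt
      have hnot : ¬ s2[j] < v := by
        intro hc; exact h ⟨hlt, by rw [hget]; exact hc⟩
      rw [hdrop, dropLt, if_neg hnot]
    · have : j = s2.length := le_antisymm hj hge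
      simp [this, List.drop_length, dropLt]

theorem advEq_sub (s2 : List Int) (v : Int) (j : Nat) (hj : j ≤ s2.length) :
    (advEq s2 v j : Int) - (j : Int) = countPrefixEq v (s2.drop j) := by
  fun_induction advEq s2 v j with
  | case1 j h ih =>
    have hlt : j < s2.length := h.1
    have hdrop : s2.drop j = s2[j] :: s2.drop (j + 1) := List.drop_eq_getElem_cons hlt
    have hget : s2.getD j 0 = s2[j] := List.getD_eq_getElem s2 0 hlt
    have heq : s2[j] = v := by rw [← hget]; exact h.2
    have := ih (by omega)
    rw [hdrop, countPrefixEq, if_neg (by simp [heq])]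
    omega
  | case2 j h =>
    rcases Nat.lt_or_ge j s2.length with hlt | hge
    · have hdrop : s2.drop j = s2[j] :: s2.drop (j + 1) := List.drop_eq_getElem_cons hlt
      have hget : s2.getD j 0 = s2[j] := List.getD_eq_getElem s2 0 hlt
      have hne : s2[j] ≠ v := by
        intro hc; exact h ⟨hlt, by rw [hget]; exact hc⟩
      rw [hdrop, countPrefixEq, if_pos hne]
      omega
    · have : j = s2.length := le_antisymm hj hge
      simp [this, List.drop_length, countPrefixEq]

-- the index-based fold computes the same score as the suffix-based fold
theorem idx_fold_eq_suffix_fold (s2 : List Int) (t : List Int) :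
    ∀ (j : Nat) (acc : Int), j ≤ s2.length →
    (t.foldl (fun st v =>
        let j' := advLt s2 v st.1
        let k := advEq s2 v j'
        (j', st.2 + v * ((k : Int) - (j' : Int)))) (j, acc)).2
      = (t.foldl (fun st v =>
          let rest := dropLt v st.1
          (rest, st.2 + v * countPrefixEq v rest)) (s2.drop j, acc)).2 := by
  induction t with
  | nil => intro j acc _; simp
  | cons v t ih =>
    intro j acc hj
    have hle := advLt_le s2 v j hj
    simp only [List.foldl_cons]
    rw [ih (advLt s2 v j) _ hle.2, drop_advLt s2 v j hj,
      advEq_sub s2 v (advLt s2 v j) hle.2, drop_advLt s2 v j hj]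

theorem part2_alt_eq_sum (a1 a2 : List Int) :
    part2_alt a1 a2 = (a1.map (fun no => no * ((a2.count no : Int)))).sum := by
  unfold part2_alt
  simp only []
  rw [idx_fold_eq_suffix_fold _ _ 0 0 (Nat.zero_le _), List.drop_zero]
  have h1 : (PySem.List.sorted a1 (fun x => x) false).Pairwise (· ≤ ·) :=
    PySem.List.sorted_pairwise a1 (fun x => x)
  have h2 : (PySem.List.sorted a2 (fun x => x) false).Pairwise (· ≤ ·) :=
    PySem.List.sorted_pairwise a2 (fun x => x)
  rw [merge_scan_invariant _ _ _ h1 h2, zero_add]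
  have hperm2 : (PySem.List.sorted a2 (fun x => x) false).Perm a2 :=
    PySem.List.sorted_perm a2 (fun x => x) false
  have hmapeq : (PySem.List.sorted a1 (fun x => x) false).map
      (fun v => v * (((PySem.List.sorted a2 (fun x => x) false).count v : Nat) : Int))
      = (PySem.List.sorted a1 (fun x => x) false).map
        (fun v => v * ((a2.count v : Nat) : Int)) := by
    apply List.map_congr_left
    intro v _
    rw [hperm2.count_eq v]
  rw [hmapeq]
  exact ((PySem.List.sorted_perm a1 (fun x => x) false).map
    (fun v => v * ((a2.count v : Nat) : Int))).sum_eq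

-- ===== VERDICT (by name: the statement is the Claim_ definition above) =====
theorem part2_spec : Claim_equal_part2 := by
  intro a1 a2 _
  unfold Spec_part2
  rw [part2_eq_sum, part2_alt_eq_sum]
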